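-- pv_equiv track=rewrite | github.com/tejsohi/4CS001-Intro-To-Programming | hangman_template.py | get_remaining_letters
-- ===== SOURCE A (Python) =====
-- from string import ascii_lowercase
--
-- def get_remaining_letters(letters_guessed):
--     """
--     Determine the letters that have not been guessed
--
--     Args:
--         letters_guessed: list (of strings), which letters have been guessed
--
--     Returns:
--         String, comprised of letters that haven't been guessed yet.
--     """
--     # TODO: Fill in your code here
--
--     alphabet = list(ascii_lowercase)
--
--     for letter in letters_guessed:
--         for character in alphabet:
--             if letter == character:
--                 alphabet.remove(character)
--
--     remainingLetters = "".join(alphabet)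
--     return remainingLetters
-- ===== SOURCE B (Python) =====
-- from string import ascii_lowercase
--
-- def get_remaining_letters(letters_guessed):
--     return "".join(c for c in ascii_lowercase if c not in letters_guessed)
-- ===== Notes on version B (the rewrite author's own statement) =====
-- stated objective: idiomatic
-- what changed: Replaces the mutable alphabet copy with per-guess find-and-remove scans by a single pass over ascii_lowercase filtering out guessed letters.
import Mathlib
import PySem

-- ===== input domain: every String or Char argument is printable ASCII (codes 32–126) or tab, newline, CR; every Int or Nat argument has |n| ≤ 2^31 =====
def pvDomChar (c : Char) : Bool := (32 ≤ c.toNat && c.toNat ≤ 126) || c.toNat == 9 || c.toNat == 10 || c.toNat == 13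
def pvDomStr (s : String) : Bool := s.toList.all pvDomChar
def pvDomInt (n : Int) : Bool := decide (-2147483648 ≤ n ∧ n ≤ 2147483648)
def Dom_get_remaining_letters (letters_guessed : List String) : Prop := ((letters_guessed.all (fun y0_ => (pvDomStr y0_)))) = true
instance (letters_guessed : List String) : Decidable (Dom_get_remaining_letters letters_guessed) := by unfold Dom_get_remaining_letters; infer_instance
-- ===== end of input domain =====

-- B replaces A's mutable alphabet copy with per-guess find-and-remove scans by one
-- filtering pass over ascii_lowercase (idiomatic; same return value).

-- ===== PORT A =====
-- alphabet = list(ascii_lowercase)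
def pvAlphabetA : List String := "abcdefghijklmnopqrstuvwxyz".toList.map (fun c => String.ofList [c])

-- inner 'for character in alphabet: if letter == character: alphabet.remove(character)':
-- Python iterates by index over the list it is mutating, so this is the exact index loop
-- (alphabet[i]? = none is exactly the loop's 'index past the end' exit); fuel only totalises
-- the recursion (one unit per iteration; alphabet.length units always suffice, proved below),
-- and remove(character) always succeeds here (character was just read from the list), getD only totalises.
def pvScanRemove (letter : String) (fuel : Nat) (alphabet : List String) (i : Nat) : List String :=
  match fuel with
  | 0 => alphabet
  | f + 1 =>
    match alphabet[i]? with
    | none => alphabet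
    | some character =>
      if letter == character then
        pvScanRemove letter f ((PySem.List.remove? alphabet character).getD alphabet) (i + 1)
      else
        pvScanRemove letter f alphabet (i + 1)

def get_remaining_letters (letters_guessed : List String) : String :=
  let alphabet := letters_guessed.foldl (fun al letter => pvScanRemove letter al.length al 0) pvAlphabetA
  PySem.Str.join "" alphabet

-- ===== PORT B =====
-- return "".join(c for c in ascii_lowercase if c not in letters_guessed)
def get_remaining_letters_alt (letters_guessed : List String) : String :=
  String.ofList ("abcdefghijklmnopqrstuvwxyz".toList.filter
    (fun c => !(letters_guessed.contains (String.ofList [c]))))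

-- ===== PRECONDITION & SPEC =====
def Spec_get_remaining_letters (letters_guessed : List String) (out : String) : Prop := out = get_remaining_letters_alt letters_guessed
instance (letters_guessed : List String) (out : String) : Decidable (Spec_get_remaining_letters letters_guessed out) := by unfold Spec_get_remaining_letters; infer_instance

-- ===== CLAIM (what is proved, stated in full; the proofs are below) =====
def Claim_equal_get_remaining_letters : Prop := ∀ (letters_guessed : List String), Dom_get_remaining_letters letters_guessed → Spec_get_remaining_letters letters_guessed (get_remaining_letters letters_guessed)

-- ===== LEMMAS AND PROOFS =====

-- If letter does not occur at an index >= i, the scan changes nothing.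
theorem pvScanRemove_no_hit (letter : String) (fuel : Nat) (al : List String) (i : Nat)
    (h : letter ∉ al.drop i) : pvScanRemove letter fuel al i = al := by
  induction fuel generalizing al i with
  | zero => rfl
  | succ f ih =>
      rw [pvScanRemove]
      cases hg : al[i]? with
      | none => rfl
      | some c =>
          obtain ⟨hi, hc⟩ := List.getElem?_eq_some_iff.mp hg
          have hd : al.drop i = c :: al.drop (i + 1) := by
            rw [List.drop_eq_getElem_cons hi, hc]
          have hne : ¬ (letter == c) = true := by
            simp only [beq_iff_eq]
            rintro rfl
            exact h (by rw [hd]; exact List.mem_cons_self)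
          dsimp only
          rw [if_neg hne]
          exact ih al (i + 1) (fun hm => h (by rw [hd]; exact List.mem_cons_of_mem _ hm))

-- The scan from index pre.length on pre ++ suf erases the occurrence of letter in suf (if any).
theorem pvScanRemove_spec (letter : String) (suf pre : List String) (fuel : Nat)
    (hfuel : suf.length ≤ fuel) (hpre : letter ∉ pre) (hnd : (pre ++ suf).Nodup) :
    pvScanRemove letter fuel (pre ++ suf) pre.length = pre ++ suf.erase letter := by
  induction suf generalizing pre fuel with
  | nil =>
      cases fuel with
      | zero => rfl
      | succ f => rw [pvScanRemove]; simp
  | cons x rest ih =>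
      obtain ⟨f, rfl⟩ : ∃ f, fuel = f + 1 := by
        cases fuel with
        | zero => simp at hfuel
        | succ f => exact ⟨f, rfl⟩
      rw [pvScanRemove]
      have hx : (pre ++ x :: rest)[pre.length]? = some x := by
        rw [List.getElem?_append_right (Nat.le_refl _)]
        simp
      rw [hx]
      dsimp only
      by_cases hl : letter = x
      · subst hl
        have hxmem : letter ∈ pre ++ letter :: rest := by simp
        have hnr : letter ∉ rest := by
          have := hnd.of_append_right
          exact (List.nodup_cons.mp this).1
        simp only [BEq.rfl, if_pos]
        have hr : PySem.List.remove? (pre ++ letter :: rest) letter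
            = some ((pre ++ letter :: rest).erase letter) :=
          PySem.List.remove?_eq_some_erase _ _ hxmem
        have her : (pre ++ letter :: rest).erase letter = pre ++ rest := by
          rw [List.erase_append_right _ hpre, List.erase_cons_head]
        rw [hr, Option.getD_some, her]
        rw [pvScanRemove_no_hit]
        · rw [List.erase_cons_head]
        · intro hm
          exact hnr (List.mem_of_mem_drop (l := rest) (by
            have : (pre ++ rest).drop (pre.length + 1) = rest.drop 1 := by
              simp
            rwa [this] at hm))
      · have hne : ¬ (letter == x) = true := by simpa using hl
        rw [if_neg hne]
        have h1 : pre ++ x :: rest = (pre ++ [x]) ++ rest := by simp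
        have h2 : pre.length + 1 = (pre ++ [x]).length := by simp
        rw [h1, h2, ih (pre ++ [x]) f (by simpa using hfuel) (by simp [hpre, hl]) (by simpa using hnd)]
        rw [List.erase_cons_tail (by simpa using fun h => hl h.symm)]
        simp

theorem pvScanRemove_zero (letter : String) (al : List String) (hnd : al.Nodup) :
    pvScanRemove letter al.length al 0 = al.erase letter := by
  simpa using pvScanRemove_spec letter al [] al.length (Nat.le_refl _) (by simp) (by simp [hnd])

theorem pvFold_filter (letters : List String) (al : List String) (hnd : al.Nodup) :
    letters.foldl (fun al letter => pvScanRemove letter al.length al 0) al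
      = al.filter (fun s => !(letters.contains s)) := by
  induction letters generalizing al with
  | nil => simp
  | cons l rest ih =>
      simp only [List.foldl_cons]
      rw [pvScanRemove_zero l al hnd, ih _ (hnd.erase l), hnd.erase_eq_filter l,
        List.filter_filter]
      refine List.filter_congr ?_
      intro x _
      by_cases h : x = l <;> simp [h, Bool.and_comm]

theorem pvJoinSingles (cs : List Char) :
    PySem.Str.join "" (cs.map fun c => String.ofList [c]) = String.ofList cs := by
  have h : (PySem.Str.join "" (cs.map fun c => String.ofList [c])).toList = cs := by
    rw [PySem.Str.toList_join]
    have hmap : List.map String.toList (cs.map fun c => String.ofList [c])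
        = cs.map (fun c => [c]) := by
      simp [List.map_map, Function.comp_def, String.toList_ofList]
    rw [hmap]
    simp [PySem.Chars.join_nil_singletons cs]
  have := congrArg String.ofList h
  rwa [String.ofList_toList] at this

theorem pvAlphabetA_nodup : pvAlphabetA.Nodup := by
  unfold pvAlphabetA
  have h : ("abcdefghijklmnopqrstuvwxyz".toList).Nodup := by decide
  refine h.map (f := fun c => String.ofList [c]) ?_
  intro a b hab
  have := congrArg String.toList hab
  simpa [String.toList_ofList] using this

-- ===== VERDICT (by name: the statement is the Claim_ definition above) =====
theorem get_remaining_letters_spec : Claim_equal_get_remaining_letters := by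
  intro lg _
  unfold Spec_get_remaining_letters get_remaining_letters get_remaining_letters_alt
  rw [pvFold_filter lg pvAlphabetA pvAlphabetA_nodup]
  unfold pvAlphabetA
  rw [List.filter_map]
  exact pvJoinSingles _
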